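-- pv_equiv track=rewrite | github.com/bitalizer/pyflashkit | flashkit/decompile/_helpers_full.py | _expand_multiline_stmt
-- ===== SOURCE A (Python) =====
-- INDENT_UNIT = '    '
--
-- def _expand_multiline_stmt(stmt: str, base_indent: str) -> list:
--     """Expand a statement containing multi-line object literals into
--     properly indented output lines.
--
--     Object literals use bare \\n as line separators. This function adds
--     context-aware indentation: each line within an object gets indented
--     4 spaces deeper than the { that opened it.  The closing } returns to
--     the indentation of the { line.
--     """
--     if '\n' not in stmt:
--         return [f'{base_indent}{stmt}']
--
--     result = []
--     base = len(base_indent)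
--     # Calculate the actual starting indent (base + leading spaces in stmt)
--     leading_spaces = len(stmt) - len(stmt.lstrip(' '))
--     actual_indent = base + leading_spaces
--     indent_stack = [actual_indent]  # stack of indent levels for each { depth
--     cur_line = base_indent
--     indent_width = len(INDENT_UNIT)
--
--     i = 0
--     while i < len(stmt):
--         ch = stmt[i]
--         if ch == '\n':
--             result.append(cur_line)
--             # Peek ahead: if next non-space char is }, use outer indent
--             j = i + 1
--             while j < len(stmt) and stmt[j] == ' ':
--                 j += 1
--             if j < len(stmt) and stmt[j] == '}':
--                 # Closing brace — use the indent of the { that opens it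
--                 if len(indent_stack) > 1:
--                     cur_line = ' ' * indent_stack[-2]
--                 else:
--                     cur_line = ' ' * indent_stack[-1]
--             else:
--                 cur_line = ' ' * indent_stack[-1]
--         elif ch == '{':
--             cur_line += ch
--             # Push new indent level (one indent_width more than current)
--             indent_stack.append(indent_stack[-1] + indent_width)
--         elif ch == '}':
--             if len(indent_stack) > 1:
--                 indent_stack.pop()
--             cur_line += ch
--         else:
--             cur_line += ch
--         i += 1
--
--     if cur_line.strip():
--         result.append(cur_line)
--     return result
-- ===== SOURCE B (Python) =====
-- INDENT_UNIT = '    '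
--
-- def _expand_multiline_stmt(stmt: str, base_indent: str) -> list:
--     """Line-wise re-implementation: split once on '\n' and carry a clamped
--     running brace depth instead of a char-by-char scan with an indent stack."""
--     if '\n' not in stmt:
--         return [base_indent + stmt]
--     lines = stmt.split('\n')
--     width = len(INDENT_UNIT)
--     actual = len(base_indent) + (len(lines[0]) - len(lines[0].lstrip(' ')))
--     out = [base_indent + lines[0]]
--     depth = 0
--     for k in range(1, len(lines)):
--         for ch in lines[k - 1]:
--             if ch == '{':
--                 depth += 1
--             elif ch == '}' and depth > 0:
--                 depth -= 1
--         line = lines[k]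
--         if line.lstrip(' ').startswith('}') and depth >= 1:
--             ind = actual + (depth - 1) * width
--         else:
--             ind = actual + depth * width
--         full = ' ' * ind + line
--         if k < len(lines) - 1 or full.strip():
--             out.append(full)
--     return out
-- ===== Notes on version B (the rewrite author's own statement) =====
-- stated objective: simpler
-- what changed: Replaces the char-by-char scan that maintains an explicit indent stack and a peek-ahead while-loop with a single split on '\n' and a per-line pass carrying one clamped integer brace depth (stack[-1] is always actual+depth*4, so the stack is redundant).
import Mathlib
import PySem

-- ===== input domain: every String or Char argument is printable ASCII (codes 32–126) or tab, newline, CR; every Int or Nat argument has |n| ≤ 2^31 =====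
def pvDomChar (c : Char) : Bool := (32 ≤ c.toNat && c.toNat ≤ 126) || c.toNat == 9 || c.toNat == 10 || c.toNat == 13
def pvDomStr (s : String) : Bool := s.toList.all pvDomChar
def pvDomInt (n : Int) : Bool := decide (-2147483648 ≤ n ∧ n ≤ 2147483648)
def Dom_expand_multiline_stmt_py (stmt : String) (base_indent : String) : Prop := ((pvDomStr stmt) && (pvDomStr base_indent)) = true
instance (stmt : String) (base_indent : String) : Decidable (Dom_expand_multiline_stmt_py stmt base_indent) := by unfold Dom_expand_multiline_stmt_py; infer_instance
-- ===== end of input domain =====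

-- B replaces A's char-by-char scan with an indent stack by a split on '\n' plus a single
-- clamped integer brace depth per line (same output; objective: simpler decomposition).


-- ===== PORT A =====
-- INDENT_UNIT = '    '
def pvINDENT_UNIT : List Char := "    ".toList

-- the peek-ahead 'j = i + 1; while j < len and stmt[j] == " ": j += 1; stmt[j] == "}"' block
def pvPeekClose : List Char → Bool
  | [] => false
  | c :: rest => if c = ' ' then pvPeekClose rest else c = '}'

-- the main 'while i < len(stmt)' loop; the Python stack's top indent_stack[-1] is the list
-- head here, indent_stack[-2] is getD 1
def pvALoop (w : Nat) : List Char → List (List Char) → List Nat → List Char →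
    List (List Char) × List Char
  | [], res, _, cur => (res, cur)
  | ch :: rest, res, stk, cur =>
    if ch = '\n' then
      let ind := if pvPeekClose rest then
          (if 1 < stk.length then stk.getD 1 0 else stk.headD 0)
        else stk.headD 0
      pvALoop w rest (res ++ [cur]) stk (List.replicate ind ' ')
    else if ch = '{' then
      pvALoop w rest res ((stk.headD 0 + w) :: stk) (cur ++ [ch])
    else if ch = '}' then
      pvALoop w rest res (if 1 < stk.length then stk.tail else stk) (cur ++ [ch])
    else
      pvALoop w rest res stk (cur ++ [ch])

-- 'if cur_line.strip(): result.append(cur_line)'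
def pvAFinish (p : List (List Char) × List Char) : List (List Char) :=
  if PySem.Chars.strip p.2 ≠ [] then p.1 ++ [p.2] else p.1

def expand_multiline_stmt_py (stmt : String) (base_indent : String) : List String :=
  if PySem.Str.isIn "\n" stmt = false then [base_indent ++ stmt]
  else
    -- leading_spaces = len(stmt) - len(stmt.lstrip(' ')); lstrip(' ') drops leading ' ' only
    let s := stmt.toList
    let leading := s.length - (s.dropWhile (· = ' ')).length
    let actual := base_indent.toList.length + leading
    (pvAFinish (pvALoop pvINDENT_UNIT.length s [] [actual] base_indent.toList)).map
      fun l => String.ofList l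

-- ===== PORT B =====
-- exact port of stmt.split('\n') (single-character separator, Python semantics)
def pvSplitNl : List Char → List (List Char)
  | [] => [[]]
  | c :: rest =>
    if c = '\n' then [] :: pvSplitNl rest
    else
      match pvSplitNl rest with
      | [] => [[c]]
      | l :: ls => (c :: l) :: ls

-- the inner 'for ch in lines[k-1]' clamped depth update
def pvBDepth (d : Nat) (line : List Char) : Nat :=
  line.foldl (fun d ch => if ch = '{' then d + 1 else if ch = '}' ∧ 0 < d then d - 1 else d) d

-- the 'for k in range(1, len(lines))' loop: state = (depth, previous line)
def pvBGo (actual w : Nat) : Nat → List Char → List (List Char) → List (List Char)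
  | _, _, [] => []
  | depth, prev, line :: rest =>
    let d := pvBDepth depth prev
    -- line.lstrip(' ').startswith('}') and depth >= 1
    let ind := if PySem.Chars.startswith (line.dropWhile (· = ' ')) ['}'] ∧ 1 ≤ d then
        actual + (d - 1) * w
      else actual + d * w
    let full := List.replicate ind ' ' ++ line
    match rest with
    | [] => if PySem.Chars.strip full ≠ [] then [full] else []   -- last line: only if full.strip()
    | _ :: _ => full :: pvBGo actual w d line rest

def expand_multiline_stmt_py_alt (stmt : String) (base_indent : String) : List String :=
  if PySem.Str.isIn "\n" stmt = false then [base_indent ++ stmt]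
  else
    let lines := pvSplitNl stmt.toList
    let l0 := lines.headD []
    let actual := base_indent.toList.length + (l0.length - (l0.dropWhile (· = ' ')).length)
    ((base_indent.toList ++ l0) :: pvBGo actual pvINDENT_UNIT.length 0 l0 lines.tail).map
      fun l => String.ofList l

-- ===== PRECONDITION & SPEC =====
def Spec_expand_multiline_stmt_py (stmt : String) (base_indent : String) (out : List String) : Prop := out = expand_multiline_stmt_py_alt stmt base_indent
instance (stmt : String) (base_indent : String) (out : List String) : Decidable (Spec_expand_multiline_stmt_py stmt base_indent out) := by unfold Spec_expand_multiline_stmt_py; infer_instance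

-- ===== CLAIM (what is proved, stated in full; the proofs are below) =====
def Claim_equal_expand_multiline_stmt_py : Prop := ∀ (stmt : String) (base_indent : String), Dom_expand_multiline_stmt_py stmt base_indent → Spec_expand_multiline_stmt_py stmt base_indent (expand_multiline_stmt_py stmt base_indent)

-- ===== LEMMAS AND PROOFS =====

-- A's indent stack after a (clamped) net depth d, built from base indent a and width w
def pvStkOf (a w : Nat) : Nat → List Nat
  | 0 => [a]
  | d + 1 => (a + (d + 1) * w) :: pvStkOf a w d

-- '\n'.join
def pvJoinNl : List (List Char) → List Char
  | [] => []
  | [l] => l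
  | l :: ls => l ++ '\n' :: pvJoinNl ls

lemma pvStkOf_headD (a w d : Nat) : (pvStkOf a w d).headD 0 = a + d * w := by
  cases d <;> simp [pvStkOf]

lemma pvStkOf_length (a w d : Nat) : (pvStkOf a w d).length = d + 1 := by
  induction d with
  | zero => rfl
  | succ d ih => simp [pvStkOf, ih]

lemma pvStkOf_getD1 (a w d : Nat) : (pvStkOf a w (d + 1))[1]?.getD 0 = a + d * w := by
  cases d <;> simp [pvStkOf]

lemma pvALoop_newline (w : Nat) (rest : List Char) (res : List (List Char)) (stk : List Nat)
    (cur : List Char) : pvALoop w ('\n' :: rest) res stk cur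
      = pvALoop w rest (res ++ [cur])
          stk (List.replicate (if pvPeekClose rest then
              (if 1 < stk.length then stk.getD 1 0 else stk.headD 0)
            else stk.headD 0) ' ') := by
  simp [pvALoop]

lemma pvALoop_open (w : Nat) (rest : List Char) (res : List (List Char)) (stk : List Nat)
    (cur : List Char) : pvALoop w ('{' :: rest) res stk cur
      = pvALoop w rest res ((stk.headD 0 + w) :: stk) (cur ++ ['{']) := by
  simp [pvALoop]

lemma pvALoop_close (w : Nat) (rest : List Char) (res : List (List Char)) (stk : List Nat)
    (cur : List Char) : pvALoop w ('}' :: rest) res stk cur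
      = pvALoop w rest res (if 1 < stk.length then stk.tail else stk) (cur ++ ['}']) := by
  simp [pvALoop]

lemma pvALoop_other (w : Nat) (c : Char) (rest : List Char) (res : List (List Char))
    (stk : List Nat) (cur : List Char) (hc : ¬ c = '\n') (h1 : ¬ c = '{') (h2 : ¬ c = '}') :
    pvALoop w (c :: rest) res stk cur = pvALoop w rest res stk (cur ++ [c]) := by
  simp [pvALoop, hc, h1, h2]

lemma pvBDepth_open (d : Nat) (t : List Char) : pvBDepth d ('{' :: t) = pvBDepth (d + 1) t := by
  simp [pvBDepth]

lemma pvBDepth_close_succ (e : Nat) (t : List Char) :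
    pvBDepth (e + 1) ('}' :: t) = pvBDepth e t := by
  simp [pvBDepth]

lemma pvBDepth_close_zero (t : List Char) : pvBDepth 0 ('}' :: t) = pvBDepth 0 t := by
  simp [pvBDepth]

lemma pvBDepth_other (d : Nat) (c : Char) (t : List Char) (h1 : ¬ c = '{') (h2 : ¬ c = '}') :
    pvBDepth d (c :: t) = pvBDepth d t := by
  simp [pvBDepth, h1, h2]

-- scanning one '\n'-free line: the stack moves as pvBDepth, the line is appended to cur
lemma pvALoop_scan (w a : Nat) : ∀ (line : List Char), '\n' ∉ line →
    ∀ (cs : List Char) (res : List (List Char)) (d : Nat) (cur : List Char),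
    pvALoop w (line ++ cs) res (pvStkOf a w d) cur
      = pvALoop w cs res (pvStkOf a w (pvBDepth d line)) (cur ++ line) := by
  intro line
  induction line with
  | nil => intro _ cs res d cur; simp [pvBDepth]
  | cons c t ih =>
    intro hn cs res d cur
    have hc : ¬ c = '\n' := fun h => hn (h ▸ List.mem_cons_self)
    have ht : '\n' ∉ t := fun h => hn (List.mem_cons_of_mem _ h)
    rw [List.cons_append]
    by_cases h1 : c = '{'
    · subst h1
      rw [pvALoop_open, pvBDepth_open]
      have hstk : ((pvStkOf a w d).headD 0 + w) :: pvStkOf a w d = pvStkOf a w (d + 1) := by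
        rw [pvStkOf_headD]
        show _ = (a + (d + 1) * w) :: pvStkOf a w d
        congr 1
        ring
      rw [hstk, ih ht]
      simp
    · by_cases h2 : c = '}'
      · subst h2
        rw [pvALoop_close]
        cases d with
        | zero =>
          have h0 : ¬ 1 < (pvStkOf a w 0).length := by rw [pvStkOf_length]; omega
          rw [if_neg h0, ih ht, pvBDepth_close_zero]
          simp
        | succ e =>
          have h0 : 1 < (pvStkOf a w (e + 1)).length := by rw [pvStkOf_length]; omega
          rw [if_pos h0, show (pvStkOf a w (e + 1)).tail = pvStkOf a w e from rfl, ih ht,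
            pvBDepth_close_succ]
          simp
      · rw [pvALoop_other w c _ _ _ _ hc h1 h2, ih ht, pvBDepth_other d c t h1 h2]
        simp

-- the peek loop over 'line ++ nl' (nl empty or starting with '\n') is B's lstrip/startswith test
lemma pvPeek_eq_cond (line nl : List Char) (hnl : nl = [] ∨ ∃ t, nl = '\n' :: t) :
    pvPeekClose (line ++ nl) = PySem.Chars.startswith (line.dropWhile (· = ' ')) ['}'] := by
  induction line with
  | nil =>
    rcases hnl with h | ⟨t, h⟩ <;> subst h <;>
      simp [pvPeekClose, PySem.Chars.startswith]
  | cons c t ih =>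
    by_cases hc : c = ' '
    · subst hc
      simpa [pvPeekClose] using ih
    · simp [pvPeekClose, hc, PySem.Chars.startswith, List.isPrefixOf,
        Bool.beq_eq_decide_eq, eq_comm]

-- core correspondence: A's loop over the joined remaining lines equals B's per-line loop
lemma pvALoop_lines (w a : Nat) : ∀ (rest : List (List Char)) (l : List Char),
    '\n' ∉ l → (∀ x ∈ rest, '\n' ∉ x) →
    ∀ (res : List (List Char)) (d : Nat) (cur : List Char),
    pvAFinish (pvALoop w (pvJoinNl (l :: rest)) res (pvStkOf a w d) cur)
      = match rest with
        | [] => pvAFinish (res, cur ++ l)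
        | _ :: _ => (res ++ [cur ++ l]) ++ pvBGo a w d l rest := by
  intro rest
  induction rest with
  | nil =>
    intro l hl _ res d cur
    rw [show pvJoinNl [l] = l ++ [] by simp [pvJoinNl], pvALoop_scan w a l hl]
    rfl
  | cons r rest' ih =>
    intro l hl hrest res d cur
    have hr : '\n' ∉ r := hrest r List.mem_cons_self
    have hrest' : ∀ x ∈ rest', '\n' ∉ x := fun x hx => hrest x (List.mem_cons_of_mem _ hx)
    have hjoin : pvJoinNl (l :: r :: rest') = l ++ '\n' :: pvJoinNl (r :: rest') := rfl
    rw [hjoin, pvALoop_scan w a l hl, pvALoop_newline]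
    -- the joined tail starts with line r, then either nothing or '\n'
    have hpeek : pvPeekClose (pvJoinNl (r :: rest'))
        = PySem.Chars.startswith (r.dropWhile (· = ' ')) ['}'] := by
      cases rest' with
      | nil =>
        rw [show pvJoinNl [r] = r ++ [] by simp [pvJoinNl]]
        exact pvPeek_eq_cond r [] (Or.inl rfl)
      | cons q qs => exact pvPeek_eq_cond r ('\n' :: pvJoinNl (q :: qs)) (Or.inr ⟨_, rfl⟩)
    -- A's chosen indent equals B's
    have hind : (if pvPeekClose (pvJoinNl (r :: rest')) then
          (if 1 < (pvStkOf a w (pvBDepth d l)).length then (pvStkOf a w (pvBDepth d l)).getD 1 0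
           else (pvStkOf a w (pvBDepth d l)).headD 0)
        else (pvStkOf a w (pvBDepth d l)).headD 0)
        = (if PySem.Chars.startswith (r.dropWhile (· = ' ')) ['}'] ∧ 1 ≤ pvBDepth d l then
            a + (pvBDepth d l - 1) * w
          else a + pvBDepth d l * w) := by
      rw [hpeek, pvStkOf_length, pvStkOf_headD]
      cases hb : PySem.Chars.startswith (r.dropWhile (· = ' ')) ['}'] with
      | false => simp
      | true =>
        cases e : pvBDepth d l with
        | zero => simp
        | succ k => simp [pvStkOf_getD1]
    rw [hind, ih r hr hrest' (res ++ [cur ++ l]) (pvBDepth d l) _]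
    cases rest' with
    | nil =>
      show _ = (res ++ [cur ++ l]) ++ pvBGo a w d l [r]
      simp only [pvBGo, pvAFinish]
      by_cases hstrip : PySem.Chars.strip (List.replicate (if PySem.Chars.startswith
          (r.dropWhile (· = ' ')) ['}'] ∧ 1 ≤ pvBDepth d l then a + (pvBDepth d l - 1) * w
          else a + pvBDepth d l * w) ' ' ++ r) ≠ [] <;>
        simp_all
    | cons q qs =>
      show _ = (res ++ [cur ++ l]) ++ pvBGo a w d l (r :: q :: qs)
      simp only [pvBGo]
      simp

-- auxiliary facts about pvSplitNl
lemma pvSplitNl_ne_nil (s : List Char) : pvSplitNl s ≠ [] := by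
  cases s with
  | nil => simp [pvSplitNl]
  | cons c rest =>
    by_cases h : c = '\n'
    · simp [pvSplitNl, h]
    · simp only [pvSplitNl, if_neg h]
      cases hs : pvSplitNl rest <;> simp

lemma pvJoinNl_cons_cons (c : Char) (l : List Char) (ls : List (List Char)) :
    pvJoinNl ((c :: l) :: ls) = c :: pvJoinNl (l :: ls) := by
  cases ls <;> simp [pvJoinNl]

lemma pvJoinNl_splitNl (s : List Char) : pvJoinNl (pvSplitNl s) = s := by
  induction s with
  | nil => rfl
  | cons c rest ih =>
    by_cases h : c = '\n'
    · subst h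
      simp only [pvSplitNl, if_true]
      obtain ⟨l, ls, hls⟩ := List.exists_cons_of_ne_nil (pvSplitNl_ne_nil rest)
      rw [hls] at ih ⊢
      simp [pvJoinNl, ih]
    · simp only [pvSplitNl, if_neg h]
      obtain ⟨l, ls, hls⟩ := List.exists_cons_of_ne_nil (pvSplitNl_ne_nil rest)
      rw [hls] at ih ⊢
      rw [pvJoinNl_cons_cons, ih]

lemma pvSplitNl_no_nl (s : List Char) : ∀ l ∈ pvSplitNl s, '\n' ∉ l := by
  induction s with
  | nil =>
    intro l hl
    simp [pvSplitNl] at hl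
    simp [hl]
  | cons c rest ih =>
    intro l hl
    by_cases hc : c = '\n'
    · subst hc
      rw [show pvSplitNl ('\n' :: rest) = [] :: pvSplitNl rest from by simp [pvSplitNl]] at hl
      rcases List.mem_cons.mp hl with h1 | h1
      · simp [h1]
      · exact ih l h1
    · rw [show pvSplitNl (c :: rest) = (match pvSplitNl rest with
          | [] => [[c]]
          | l :: ls => (c :: l) :: ls) from by simp [pvSplitNl, hc]] at hl
      obtain ⟨l', ls, hls⟩ := List.exists_cons_of_ne_nil (pvSplitNl_ne_nil rest)
      rw [hls] at hl
      rcases List.mem_cons.mp hl with h1 | h1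
      · subst h1
        intro hmem
        rcases List.mem_cons.mp hmem with h2 | h2
        · exact hc h2.symm
        · exact ih l' (hls ▸ List.mem_cons_self) h2
      · exact ih l (hls ▸ List.mem_cons_of_mem _ h1)

lemma pvSplitNl_len2 (s : List Char) (h : '\n' ∈ s) : 2 ≤ (pvSplitNl s).length := by
  induction s with
  | nil => simp at h
  | cons c rest ih =>
    by_cases hc : c = '\n'
    · subst hc
      rw [show pvSplitNl ('\n' :: rest) = [] :: pvSplitNl rest from by simp [pvSplitNl]]
      have : 1 ≤ (pvSplitNl rest).length := List.length_pos_of_ne_nil (pvSplitNl_ne_nil rest)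
      simp only [List.length_cons]
      omega
    · have hr : '\n' ∈ rest := by
        rcases List.mem_cons.mp h with h1 | h1
        · exact absurd h1.symm hc
        · exact h1
      rw [show pvSplitNl (c :: rest) = (match pvSplitNl rest with
          | [] => [[c]]
          | l :: ls => (c :: l) :: ls) from by simp [pvSplitNl, hc]]
      obtain ⟨l, ls, hls⟩ := List.exists_cons_of_ne_nil (pvSplitNl_ne_nil rest)
      have := ih hr
      rw [hls] at this ⊢
      simpa using this

lemma pvTakeWhile_append_nl (l t : List Char) :
    (l ++ '\n' :: t).takeWhile (· = ' ') = l.takeWhile (· = ' ') := by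
  induction l with
  | nil => simp
  | cons c cl ih => by_cases hc : c = ' ' <;> simp [hc, ih]

lemma pvLead_eq (xs : List Char) :
    xs.length - (xs.dropWhile (· = ' ')).length = (xs.takeWhile (· = ' ')).length := by
  have h := congrArg List.length (List.takeWhile_append_dropWhile (p := (· = ' ')) (l := xs))
  simp only [List.length_append] at h
  omega

lemma pvIsIn_newline (s : String) (h : ¬ PySem.Str.isIn "\n" s = false) : '\n' ∈ s.toList := by
  have : PySem.Str.isIn "\n" s = true := by
    cases hb : PySem.Str.isIn "\n" s
    · exact absurd hb h
    · rfl
  have hinf : "\n".toList <:+: s.toList := (PySem.Str.isIn_iff_infix _ _).mp this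
  exact List.singleton_sublist.mp hinf.sublist

-- ===== VERDICT (by name: the statement is the Claim_ definition above) =====
theorem expand_multiline_stmt_py_spec : Claim_equal_expand_multiline_stmt_py := by
  intro stmt base_indent _
  show expand_multiline_stmt_py stmt base_indent = expand_multiline_stmt_py_alt stmt base_indent
  unfold expand_multiline_stmt_py expand_multiline_stmt_py_alt
  by_cases h : PySem.Str.isIn "\n" stmt = false
  · rw [if_pos h, if_pos h]
  · rw [if_neg h, if_neg h]
    have hmem : '\n' ∈ stmt.toList := pvIsIn_newline stmt h
    obtain ⟨l0, ls, hls⟩ := List.exists_cons_of_ne_nil (pvSplitNl_ne_nil stmt.toList)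
    have hlen := pvSplitNl_len2 stmt.toList hmem
    rw [hls] at hlen
    obtain ⟨r, rest, hrest⟩ : ∃ r rest, ls = r :: rest := by
      cases ls with
      | nil => simp at hlen
      | cons r rest => exact ⟨r, rest, rfl⟩
    subst hrest
    have hjoin : stmt.toList = pvJoinNl (l0 :: r :: rest) := by
      rw [← hls, pvJoinNl_splitNl]
    have hnl := pvSplitNl_no_nl stmt.toList
    rw [hls] at hnl
    have hl0 : '\n' ∉ l0 := hnl l0 List.mem_cons_self
    have htl : ∀ x ∈ r :: rest, '\n' ∉ x := fun x hx => hnl x (List.mem_cons_of_mem _ hx)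
    -- the two 'actual' indents agree
    have hlead : stmt.toList.length - (stmt.toList.dropWhile (· = ' ')).length
        = l0.length - (l0.dropWhile (· = ' ')).length := by
      rw [pvLead_eq, pvLead_eq]
      have : stmt.toList.takeWhile (· = ' ') = l0.takeWhile (· = ' ') := by
        rw [hjoin, show pvJoinNl (l0 :: r :: rest) = l0 ++ '\n' :: pvJoinNl (r :: rest) from rfl,
          pvTakeWhile_append_nl]
      rw [this]
    simp only [hls, List.headD_cons, List.tail_cons]
    rw [hlead]
    have hstk : [base_indent.toList.length + (l0.length - (l0.dropWhile (· = ' ')).length)]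
        = pvStkOf (base_indent.toList.length + (l0.length - (l0.dropWhile (· = ' ')).length))
            pvINDENT_UNIT.length 0 := rfl
    conv_lhs => rw [hjoin]
    rw [hstk, pvALoop_lines pvINDENT_UNIT.length _ (r :: rest) l0 hl0 htl [] 0 base_indent.toList]
    simp
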